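-- pv_equiv track=rewrite | github.com/Josh-test-lab/parking-lot-simulation | event.py | bicycle_left_motorcycle_space_event
-- ===== SOURCE A (Python) =====
-- def bicycle_left_motorcycle_space_event(new_bicycle, bicycle_parked, remain_motorcycle_parking_space, max_motorcycle_parking_space, max_bicycle_parked_in_a_motorcycle_space = 2):
--     bicycle_left_failed = 0
--     if new_bicycle == 0:
--         return bicycle_parked, remain_motorcycle_parking_space, bicycle_left_failed
--     if max_bicycle_parked_in_a_motorcycle_space == 1:
--         return vehicle_left_event(new_bicycle, bicycle_parked, remain_motorcycle_parking_space)
--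
--     if bicycle_parked < new_bicycle:
--         bicycle_left_failed = new_bicycle - bicycle_parked
--         new_bicycle = bicycle_parked
--
--     space = int(new_bicycle / max_bicycle_parked_in_a_motorcycle_space)
--     new_bicycle = new_bicycle % max_bicycle_parked_in_a_motorcycle_space
--
--     if space + remain_motorcycle_parking_space <= max_motorcycle_parking_space:
--         remain_motorcycle_parking_space += space
--         bicycle_parked -= (max_bicycle_parked_in_a_motorcycle_space * space)
--     else:
--         bicycle_left_failed += (max_bicycle_parked_in_a_motorcycle_space * (space + remain_motorcycle_parking_space - max_motorcycle_parking_space))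
--         remain_motorcycle_parking_space = max_motorcycle_parking_space
--         bicycle_parked = 0
--
--     while new_bicycle > 0:
--         if bicycle_parked >= new_bicycle:
--             if bicycle_parked % max_bicycle_parked_in_a_motorcycle_space == 1:
--                 bicycle_parked -= 1
--                 remain_motorcycle_parking_space += 1
--             else:
--                 bicycle_parked -= 1
--         else:
--             bicycle_left_failed += new_bicycle
--             break
--         new_bicycle -= 1
--
--     return bicycle_parked, remain_motorcycle_parking_space, bicycle_left_failed
--
-- def vehicle_left_event(new_vehicle, vehicle_parked, remain_vehicle_parking_space, max_vehicle_parking_space):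
--     vehicle_left_failed = 0
--     if new_vehicle == 0:
--         return vehicle_parked, remain_vehicle_parking_space, vehicle_left_failed
--
--     if vehicle_parked < new_vehicle:
--         vehicle_left_failed = new_vehicle - vehicle_parked
--         new_vehicle = vehicle_parked
--
--     if new_vehicle + remain_vehicle_parking_space <= max_vehicle_parking_space:
--         remain_vehicle_parking_space += new_vehicle
--         vehicle_parked -= new_vehicle
--     else:
--         vehicle_left_failed += (new_vehicle + remain_vehicle_parking_space - max_vehicle_parking_space)
--         remain_vehicle_parking_space = max_vehicle_parking_space
--         vehicle_parked = 0
--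
--     return vehicle_parked, remain_vehicle_parking_space, vehicle_left_failed
-- ===== SOURCE B (Python) =====
-- def bicycle_left_motorcycle_space_event(new_bicycle, bicycle_parked, remain_motorcycle_parking_space, max_motorcycle_parking_space, max_bicycle_parked_in_a_motorcycle_space=2):
--     if new_bicycle == 0:
--         return bicycle_parked, remain_motorcycle_parking_space, 0
--     m = max_bicycle_parked_in_a_motorcycle_space
--     failed = max(new_bicycle - bicycle_parked, 0)
--     n = min(new_bicycle, bicycle_parked)
--     space = int(n / m)
--     rest = n % m
--     if space + remain_motorcycle_parking_space <= max_motorcycle_parking_space: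
--         bp = bicycle_parked - m * space
--         rm = remain_motorcycle_parking_space + space
--     else:
--         failed += m * (space + remain_motorcycle_parking_space - max_motorcycle_parking_space)
--         bp = 0
--         rm = max_motorcycle_parking_space
--     if rest > 0:
--         if bp >= rest:
--             # each leaving bicycle frees a space exactly when it empties one,
--             # i.e. at the residues congruent to 1 mod m in (bp - rest, bp]
--             rm += (bp - 1) // m - (bp - rest - 1) // m
--             bp -= rest
--         else:
--             failed += rest
--     return bp, rm, failed
-- ===== Notes on version B (the rewrite author's own statement) =====
-- stated objective: faster
-- what changed: The per-bicycle decrement while-loop (up to max-1 iterations) is replaced by a closed-form floor-division count of the residues congruent to 1 mod max over the affected contiguous range, making the whole function branch-and-arithmetic only; Pre_ excludes only the inputs where A raises (max=1 with bicycles leaving is a TypeError, max=0 a ZeroDivisionError).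
import Mathlib
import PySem

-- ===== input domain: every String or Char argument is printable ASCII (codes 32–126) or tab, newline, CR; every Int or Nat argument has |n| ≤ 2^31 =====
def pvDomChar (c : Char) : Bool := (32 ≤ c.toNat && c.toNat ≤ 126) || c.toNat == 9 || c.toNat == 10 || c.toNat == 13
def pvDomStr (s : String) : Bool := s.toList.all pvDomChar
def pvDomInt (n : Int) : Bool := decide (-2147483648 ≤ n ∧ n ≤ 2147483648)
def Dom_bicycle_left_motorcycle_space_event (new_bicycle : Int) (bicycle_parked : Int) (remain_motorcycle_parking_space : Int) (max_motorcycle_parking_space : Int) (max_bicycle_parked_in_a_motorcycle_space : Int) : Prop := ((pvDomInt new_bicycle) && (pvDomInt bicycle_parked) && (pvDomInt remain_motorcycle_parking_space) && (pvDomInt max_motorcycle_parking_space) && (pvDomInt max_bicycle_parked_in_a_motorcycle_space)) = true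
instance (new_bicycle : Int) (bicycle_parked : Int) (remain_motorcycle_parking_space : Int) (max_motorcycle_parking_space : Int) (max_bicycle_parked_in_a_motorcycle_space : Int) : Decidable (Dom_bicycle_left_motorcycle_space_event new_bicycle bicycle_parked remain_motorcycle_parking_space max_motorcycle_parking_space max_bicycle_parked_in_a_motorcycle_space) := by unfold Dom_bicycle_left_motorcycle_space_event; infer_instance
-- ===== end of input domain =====

-- B replaces A's per-bicycle decrement while-loop by divmod plus a closed-form floor-division
-- count of the residues ≡ 1 (mod max) in the affected contiguous range (objective: faster).

-- ===== PORT A =====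
-- the while-loop of A: state (new_bicycle, bicycle_parked, remain, failed), decrementing new_bicycle
def pvALoop (m : Int) (nb : Int) (bp : Int) (rm : Int) (failed : Int) : List Int :=
  if 0 < nb then
    if nb ≤ bp then
      if PySem.Int.mod bp m = 1 then pvALoop m (nb - 1) (bp - 1) (rm + 1) failed
      else pvALoop m (nb - 1) (bp - 1) rm failed
    else [bp, rm, failed + nb]
  else [bp, rm, failed]
termination_by nb.toNat
decreasing_by all_goals omega

def bicycle_left_motorcycle_space_event (new_bicycle : Int) (bicycle_parked : Int) (remain_motorcycle_parking_space : Int) (max_motorcycle_parking_space : Int) (max_bicycle_parked_in_a_motorcycle_space : Int) : List Int :=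
  if new_bicycle = 0 then [bicycle_parked, remain_motorcycle_parking_space, 0]
  else if max_bicycle_parked_in_a_motorcycle_space = 1 then
    -- A calls vehicle_left_event without its max argument here: TypeError, excluded by Pre_
    [0, 0, 0]
  else
    let failed := if bicycle_parked < new_bicycle then new_bicycle - bicycle_parked else 0
    let nb := if bicycle_parked < new_bicycle then bicycle_parked else new_bicycle
    -- int(new_bicycle / max): exact truncating division on Dom (|n| ≤ 2^31 < 2^53);
    -- max = 0 is Python's ZeroDivisionError, excluded by Pre_
    let space := PySem.Int.truncdiv nb max_bicycle_parked_in_a_motorcycle_space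
    let nb2 := PySem.Int.mod nb max_bicycle_parked_in_a_motorcycle_space
    if space + remain_motorcycle_parking_space ≤ max_motorcycle_parking_space then
      pvALoop max_bicycle_parked_in_a_motorcycle_space nb2
        (bicycle_parked - max_bicycle_parked_in_a_motorcycle_space * space)
        (remain_motorcycle_parking_space + space) failed
    else
      pvALoop max_bicycle_parked_in_a_motorcycle_space nb2 0 max_motorcycle_parking_space
        (failed + max_bicycle_parked_in_a_motorcycle_space * (space + remain_motorcycle_parking_space - max_motorcycle_parking_space))

-- ===== PORT B =====
def bicycle_left_motorcycle_space_event_alt (new_bicycle : Int) (bicycle_parked : Int) (remain_motorcycle_parking_space : Int) (max_motorcycle_parking_space : Int) (max_bicycle_parked_in_a_motorcycle_space : Int) : List Int :=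
  if new_bicycle = 0 then [bicycle_parked, remain_motorcycle_parking_space, 0]
  else
    let m := max_bicycle_parked_in_a_motorcycle_space
    let failed := max (new_bicycle - bicycle_parked) 0
    let n := min new_bicycle bicycle_parked
    -- int(n / m): exact truncating division on Dom (|n| ≤ 2^31 < 2^53)
    let space := PySem.Int.truncdiv n m
    let rest := PySem.Int.mod n m
    let res :=
      if space + remain_motorcycle_parking_space ≤ max_motorcycle_parking_space then
        (bicycle_parked - m * space, remain_motorcycle_parking_space + space, failed)
      else
        ((0 : Int), max_motorcycle_parking_space, failed + m * (space + remain_motorcycle_parking_space - max_motorcycle_parking_space))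
    let bp := res.1
    let rm := res.2.1
    let f := res.2.2
    if 0 < rest then
      if rest ≤ bp then
        -- freed spaces = count of k in (bp - rest, bp] with k % m == 1
        [bp - rest, rm + (PySem.Int.floordiv (bp - 1) m - PySem.Int.floordiv (bp - rest - 1) m), f]
      else [bp, rm, f + rest]
    else [bp, rm, f]

-- ===== PRECONDITION & SPEC =====
-- Pre_ excludes exactly the inputs on which A raises: with new_bicycle ≠ 0, max = 1 is a
-- TypeError (vehicle_left_event is called without its max_vehicle_parking_space argument)
-- and max = 0 a ZeroDivisionError.
def Pre_bicycle_left_motorcycle_space_event (new_bicycle : Int) (bicycle_parked : Int) (remain_motorcycle_parking_space : Int) (max_motorcycle_parking_space : Int) (max_bicycle_parked_in_a_motorcycle_space : Int) : Prop :=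
  new_bicycle = 0 ∨ (max_bicycle_parked_in_a_motorcycle_space ≠ 0 ∧ max_bicycle_parked_in_a_motorcycle_space ≠ 1)
instance (new_bicycle : Int) (bicycle_parked : Int) (remain_motorcycle_parking_space : Int) (max_motorcycle_parking_space : Int) (max_bicycle_parked_in_a_motorcycle_space : Int) : Decidable (Pre_bicycle_left_motorcycle_space_event new_bicycle bicycle_parked remain_motorcycle_parking_space max_motorcycle_parking_space max_bicycle_parked_in_a_motorcycle_space) := by unfold Pre_bicycle_left_motorcycle_space_event; infer_instance

def pvWitness_bicycle_left_motorcycle_space_event : Int × Int × Int × Int × Int := (5, 7, 1, 10, 2)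

def Spec_bicycle_left_motorcycle_space_event (new_bicycle : Int) (bicycle_parked : Int) (remain_motorcycle_parking_space : Int) (max_motorcycle_parking_space : Int) (max_bicycle_parked_in_a_motorcycle_space : Int) (out : List Int) : Prop := out = bicycle_left_motorcycle_space_event_alt new_bicycle bicycle_parked remain_motorcycle_parking_space max_motorcycle_parking_space max_bicycle_parked_in_a_motorcycle_space
instance (new_bicycle : Int) (bicycle_parked : Int) (remain_motorcycle_parking_space : Int) (max_motorcycle_parking_space : Int) (max_bicycle_parked_in_a_motorcycle_space : Int) (out : List Int) : Decidable (Spec_bicycle_left_motorcycle_space_event new_bicycle bicycle_parked remain_motorcycle_parking_space max_motorcycle_parking_space max_bicycle_parked_in_a_motorcycle_space out) := by unfold Spec_bicycle_left_motorcycle_space_event; infer_instance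

-- ===== CLAIM =====
def Claim_equal_bicycle_left_motorcycle_space_event : Prop := ∀ (new_bicycle : Int) (bicycle_parked : Int) (remain_motorcycle_parking_space : Int) (max_motorcycle_parking_space : Int) (max_bicycle_parked_in_a_motorcycle_space : Int), Dom_bicycle_left_motorcycle_space_event new_bicycle bicycle_parked remain_motorcycle_parking_space max_motorcycle_parking_space max_bicycle_parked_in_a_motorcycle_space → Pre_bicycle_left_motorcycle_space_event new_bicycle bicycle_parked remain_motorcycle_parking_space max_motorcycle_parking_space max_bicycle_parked_in_a_motorcycle_space → Spec_bicycle_left_motorcycle_space_event new_bicycle bicycle_parked remain_motorcycle_parking_space max_motorcycle_parking_space max_bicycle_parked_in_a_motorcycle_space (bicycle_left_motorcycle_space_event new_bicycle bicycle_parked remain_motorcycle_parking_space max_motorcycle_parking_space max_bicycle_parked_in_a_motorcycle_space)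

-- ===== LEMMAS AND PROOFS =====

-- the floor quotient of (bp-1) steps past that of (bp-2) exactly when bp ≡ 1 (mod m)
lemma pv_cross (m bp : Int) (hm : 2 ≤ m) :
    PySem.Int.floordiv (bp - 1) m - PySem.Int.floordiv (bp - 2) m
      = if PySem.Int.mod bp m = 1 then 1 else 0 := by
  have hm0 : (0:Int) ≤ m := by omega
  have hmne : m ≠ 0 := by omega
  simp only [PySem.Int.floordiv, PySem.Int.mod]
  simp only [Int.fdiv_eq_ediv, Int.fmod_eq_emod, hm0, true_or, if_true, add_zero, sub_zero]
  have h1 := Int.emod_nonneg bp hmne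
  have h2 := Int.emod_lt_of_pos bp (by omega : (0:Int) < m)
  have hb := Int.mul_ediv_add_emod bp m
  have hmul : m * (bp / m - 1) = m * (bp / m) - m := by ring
  by_cases hs1 : bp % m = 1
  · have e1 : bp - 1 = 0 + m * (bp / m) := by omega
    have e2 : bp - 2 = (m - 1) + m * (bp / m - 1) := by omega
    have d1 : (bp - 1) / m = bp / m := by
      rw [e1, Int.add_mul_ediv_left _ _ hmne, Int.zero_ediv, zero_add]
    have d2 : (bp - 2) / m = bp / m - 1 := by
      rw [e2, Int.add_mul_ediv_left _ _ hmne,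
          Int.ediv_eq_zero_of_lt (by omega) (by omega)]; ring
    rw [d1, d2]; simp [hs1]
  · by_cases hs0 : bp % m = 0
    · have e1 : bp - 1 = (m - 1) + m * (bp / m - 1) := by omega
      have e2 : bp - 2 = (m - 2) + m * (bp / m - 1) := by omega
      have d1 : (bp - 1) / m = bp / m - 1 := by
        rw [e1, Int.add_mul_ediv_left _ _ hmne,
            Int.ediv_eq_zero_of_lt (by omega) (by omega)]; ring
      have d2 : (bp - 2) / m = bp / m - 1 := by
        rw [e2, Int.add_mul_ediv_left _ _ hmne,
            Int.ediv_eq_zero_of_lt (by omega) (by omega)]; ring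
      rw [d1, d2]; simp [hs1]
    · have e1 : bp - 1 = (bp % m - 1) + m * (bp / m) := by omega
      have e2 : bp - 2 = (bp % m - 2) + m * (bp / m) := by omega
      have d1 : (bp - 1) / m = bp / m := by
        rw [e1, Int.add_mul_ediv_left _ _ hmne,
            Int.ediv_eq_zero_of_lt (by omega) (by omega)]; ring
      have d2 : (bp - 2) / m = bp / m := by
        rw [e2, Int.add_mul_ediv_left _ _ hmne,
            Int.ediv_eq_zero_of_lt (by omega) (by omega)]; ring
      rw [d1, d2]; simp [hs1]

-- closed form of A's while-loop
lemma pvALoop_closed (m : Int) (hm : 2 ≤ m) : ∀ (k : Nat) (r bp rm f : Int), r.toNat = k →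
    pvALoop m r bp rm f =
      if 0 < r then
        if r ≤ bp then
          [bp - r, rm + (PySem.Int.floordiv (bp - 1) m - PySem.Int.floordiv (bp - r - 1) m), f]
        else [bp, rm, f + r]
      else [bp, rm, f] := by
  intro k
  induction k with
  | zero =>
    intro r bp rm f hk
    have hr : r ≤ 0 := by omega
    rw [pvALoop]; simp [not_lt.mpr hr]
  | succ k ih =>
    intro r bp rm f hk
    have hr : 0 < r := by omega
    rw [pvALoop, if_pos hr, if_pos hr]
    by_cases hbp : r ≤ bp
    · rw [if_pos hbp]
      have hcross := pv_cross m bp hm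
      have hk' : (r - 1).toNat = k := by omega
      by_cases hmod : PySem.Int.mod bp m = 1
      · rw [if_pos hmod, ih (r-1) (bp-1) (rm+1) f hk', if_pos hbp]
        rw [if_pos hmod] at hcross
        by_cases hr1 : 0 < r - 1
        · rw [if_pos hr1, if_pos (by omega : r - 1 ≤ bp - 1)]
          have : bp - 1 - (r - 1) - 1 = bp - r - 1 := by ring
          rw [this]
          have e2 : bp - 1 - 1 = bp - 2 := by ring
          rw [e2] at *
          simp only [List.cons.injEq, and_true, true_and]; omega
        · rw [if_neg hr1]
          have hre : r = 1 := by omega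
          subst hre
          have e2 : bp - 1 - 1 = bp - 2 := by ring
          rw [e2] at *
          simp only [List.cons.injEq, and_true, true_and]; omega
      · rw [if_neg hmod, ih (r-1) (bp-1) rm f hk', if_pos hbp]
        rw [if_neg hmod] at hcross
        by_cases hr1 : 0 < r - 1
        · rw [if_pos hr1, if_pos (by omega : r - 1 ≤ bp - 1)]
          have : bp - 1 - (r - 1) - 1 = bp - r - 1 := by ring
          rw [this]
          have e2 : bp - 1 - 1 = bp - 2 := by ring
          rw [e2] at *
          simp only [List.cons.injEq, and_true, true_and]; omega
        · rw [if_neg hr1]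
          have hre : r = 1 := by omega
          subst hre
          have e2 : bp - 1 - 1 = bp - 2 := by ring
          rw [e2] at *
          simp only [List.cons.injEq, and_true, true_and]; omega
    · rw [if_neg hbp, if_neg hbp]

lemma pvALoop_nonpos (m r bp rm f : Int) (h : r ≤ 0) : pvALoop m r bp rm f = [bp, rm, f] := by
  rw [pvALoop]; simp [not_lt.mpr h]

-- ===== VERDICT (by name: the statement is the Claim_ definition above) =====
theorem bicycle_left_motorcycle_space_event_spec : Claim_equal_bicycle_left_motorcycle_space_event := by
  intro nb bp rm mx m _ hpre
  unfold Spec_bicycle_left_motorcycle_space_event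
  by_cases h0 : nb = 0
  · simp [bicycle_left_motorcycle_space_event, bicycle_left_motorcycle_space_event_alt, h0]
  · have hm0 : m ≠ 0 := by rcases hpre with h | h; exacts [absurd h h0, h.1]
    have hm1 : m ≠ 1 := by rcases hpre with h | h; exacts [absurd h h0, h.2]
    simp only [bicycle_left_motorcycle_space_event, bicycle_left_motorcycle_space_event_alt,
      if_neg h0, if_neg hm1]
    have hmax : (if bp < nb then nb - bp else 0) = max (nb - bp) 0 := by split_ifs <;> omega
    have hmin : (if bp < nb then bp else nb) = min nb bp := by split_ifs <;> omega
    rw [hmax, hmin]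
    rcases lt_or_gt_of_ne hm0 with hneg | hpos
    · -- m < 0: Python's remainder is nonpositive, so A's loop runs zero times and B's
      -- rest > 0 branch is not taken
      have hr : PySem.Int.mod (min nb bp) m ≤ 0 := (PySem.Int.mod_neg_bounds (min nb bp) hneg).2
      rw [pvALoop_nonpos _ _ _ _ _ hr, pvALoop_nonpos _ _ _ _ _ hr]
      simp only [if_neg (not_lt.mpr hr)]
      split_ifs <;> rfl
    · have hm2 : 2 ≤ m := by omega
      rw [pvALoop_closed m hm2 (PySem.Int.mod (min nb bp) m).toNat _ _ _ _ rfl,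
          pvALoop_closed m hm2 (PySem.Int.mod (min nb bp) m).toNat _ _ _ _ rfl]
      split_ifs <;> rfl
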